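-- pv_equiv track=rewrite | github.com/Arjun3125/hail_marry | backend/src/interfaces/whatsapp_bot/agent.py | _extract_explicit_topic
-- ===== SOURCE A (Python) =====
-- def _extract_explicit_topic(message: str) -> str:
--     text = (message or "").strip()
--     lowered = text.lower()
--     prefixes = [
--         "generate quiz for",
--         "create quiz for",
--         "make quiz for",
--         "generate quiz on",
--         "create quiz on",
--         "make quiz on",
--         "quiz on",
--         "quiz for",
--         "quiz bana",
--         "generate flashcards for",
--         "create flashcards for",
--         "make flashcards for",
--         "flashcards for",
--         "mala flashcards pahije",
--         "generate mind map for",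
--         "create mind map for",
--         "mind map on",
--         "mind map for",
--         "mind map bana",
--         "generate flowchart for",
--         "create flowchart for",
--         "flowchart for",
--         "flow chart for",
--         "flowchart bana",
--         "generate concept map for",
--         "concept map for",
--         "concept map bana",
--         "teach me",
--         "explain",
--         "summarize",
--         "summary of",
--         "tell me about",
--         "what is",
--         "why is",
--         "how does",
--         "help me debate",
--         "review essay",
--         "check essay",
--         "essay review",
--         "study guide for",
--         "study guide on",
--         "generate study guide for",
--         "create study guide for",
--         "audio overview for",
--         "audio overview on",
--         "generate audio overview for",
--         "create audio overview for",
--         "podcast for",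
--         "podcast on",
--     ]
--     for prefix in prefixes:
--         if lowered.startswith(prefix):
--             return text[len(prefix):].strip(" :-?")
--     return text
-- ===== SOURCE B (Python) =====
-- _PREFIXES = [
--     "generate quiz for",
--     "create quiz for",
--     "make quiz for",
--     "generate quiz on",
--     "create quiz on",
--     "make quiz on",
--     "quiz on",
--     "quiz for",
--     "quiz bana",
--     "generate flashcards for",
--     "create flashcards for",
--     "make flashcards for",
--     "flashcards for",
--     "mala flashcards pahije",
--     "generate mind map for",
--     "create mind map for",
--     "mind map on",
--     "mind map for",
--     "mind map bana",
--     "generate flowchart for",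
--     "create flowchart for",
--     "flowchart for",
--     "flow chart for",
--     "flowchart bana",
--     "generate concept map for",
--     "concept map for",
--     "concept map bana",
--     "teach me",
--     "explain",
--     "summarize",
--     "summary of",
--     "tell me about",
--     "what is",
--     "why is",
--     "how does",
--     "help me debate",
--     "review essay",
--     "check essay",
--     "essay review",
--     "study guide for",
--     "study guide on",
--     "generate study guide for",
--     "create study guide for",
--     "audio overview for",
--     "audio overview on",
--     "generate audio overview for",
--     "create audio overview for",
--     "podcast for",
--     "podcast on",
-- ]
--
--
-- def _extract_explicit_topic(message: str) -> str:
--     text = (message or "").strip()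
--     lowered = text.lower()
--     best = max((p for p in _PREFIXES if lowered.startswith(p)), key=len, default=None)
--     if best is None:
--         return text
--     return text[len(best):].strip(" :-?")
-- ===== Notes on version B (the rewrite author's own statement) =====
-- stated objective: idiomatic
-- what changed: Replaces the ordered first-match startswith loop with a generator that collects all matching prefixes and takes max(..., key=len, default=None); equal because no listed prefix is a prefix of another, so at most one can match.
import Mathlib
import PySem

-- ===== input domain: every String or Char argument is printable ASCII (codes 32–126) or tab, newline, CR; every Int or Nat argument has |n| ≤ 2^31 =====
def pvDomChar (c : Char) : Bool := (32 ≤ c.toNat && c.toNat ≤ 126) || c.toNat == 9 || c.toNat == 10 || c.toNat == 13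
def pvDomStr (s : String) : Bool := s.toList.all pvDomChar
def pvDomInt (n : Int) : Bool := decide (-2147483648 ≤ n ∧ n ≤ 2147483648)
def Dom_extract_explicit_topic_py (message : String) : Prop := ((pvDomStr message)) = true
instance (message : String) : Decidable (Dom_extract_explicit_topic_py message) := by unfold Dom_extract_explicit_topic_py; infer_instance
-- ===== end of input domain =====

-- B replaces A's ordered first-match loop by collecting all matching prefixes and taking the
-- longest (max with key=len, default=None); equal because no listed prefix is a prefix of another.

-- the literal prefix list shared by both programs (A writes it inline, B keeps it as a constant)
def pvPrefixes : List String := [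
  "generate quiz for",
  "create quiz for",
  "make quiz for",
  "generate quiz on",
  "create quiz on",
  "make quiz on",
  "quiz on",
  "quiz for",
  "quiz bana",
  "generate flashcards for",
  "create flashcards for",
  "make flashcards for",
  "flashcards for",
  "mala flashcards pahije",
  "generate mind map for",
  "create mind map for",
  "mind map on",
  "mind map for",
  "mind map bana",
  "generate flowchart for",
  "create flowchart for",
  "flowchart for",
  "flow chart for",
  "flowchart bana",
  "generate concept map for",
  "concept map for",
  "concept map bana",
  "teach me",
  "explain",
  "summarize",
  "summary of",
  "tell me about",
  "what is",
  "why is",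
  "how does",
  "help me debate",
  "review essay",
  "check essay",
  "essay review",
  "study guide for",
  "study guide on",
  "generate study guide for",
  "create study guide for",
  "audio overview for",
  "audio overview on",
  "generate audio overview for",
  "create audio overview for",
  "podcast for",
  "podcast on"]

-- ===== PORT A =====
-- the 'for prefix in prefixes: if lowered.startswith(prefix): return …' loop
def pvLoopA (text lowered : String) : List String → String
  | [] => text
  | p :: rest =>
    if PySem.Str.startswith lowered p then
      PySem.Str.stripChars (PySem.Str.slice text (some (PySem.Str.len p)) none) " :-?"
    else pvLoopA text lowered rest

def extract_explicit_topic_py (message : String) : String :=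
  let text := PySem.Str.strip message      -- (message or "").strip(); 'or' is identity on a str argument
  let lowered := PySem.Str.lower text
  pvLoopA text lowered pvPrefixes

-- ===== PORT B =====
def extract_explicit_topic_py_alt (message : String) : String :=
  let text := PySem.Str.strip message
  let lowered := PySem.Str.lower text
  -- max((p for p in _PREFIXES if lowered.startswith(p)), key=len, default=None)
  match PySem.List.max? (pvPrefixes.filter (fun p => PySem.Str.startswith lowered p))
      (fun p => PySem.Str.len p) with
  | none => text
  | some best =>
    PySem.Str.stripChars (PySem.Str.slice text (some (PySem.Str.len best)) none) " :-?"

-- ===== PRECONDITION & SPEC =====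
def Spec_extract_explicit_topic_py (message : String) (out : String) : Prop := out = extract_explicit_topic_py_alt message
instance (message : String) (out : String) : Decidable (Spec_extract_explicit_topic_py message out) := by unfold Spec_extract_explicit_topic_py; infer_instance

-- ===== CLAIM (what is proved, stated in full; the proofs are below) =====
def Claim_equal_extract_explicit_topic_py : Prop := ∀ (message : String), Dom_extract_explicit_topic_py message → Spec_extract_explicit_topic_py message (extract_explicit_topic_py message)

-- ===== LEMMAS AND PROOFS =====

-- A's loop returns text, or the value built from the FIRST matching prefix
theorem pvLoopA_eq_filter (text lowered : String) (L : List String) :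
    pvLoopA text lowered L =
      match L.filter (fun p => PySem.Str.startswith lowered p) with
      | [] => text
      | p :: _ => PySem.Str.stripChars (PySem.Str.slice text (some (PySem.Str.len p)) none) " :-?" := by
  induction L with
  | nil => rfl
  | cons a t ih =>
    by_cases h : PySem.Str.startswith lowered a
    all_goals
      rw [PySem.Str.startswith_eq] at h
      simp [pvLoopA, List.filter, h, ih]

-- no listed prefix is a prefix of another (checked once over the literal list)
theorem pvPrefixes_pairwise :
    pvPrefixes.Pairwise (fun p q => ¬(p.toList <+: q.toList) ∧ ¬(q.toList <+: p.toList)) := by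
  decide

-- two prefixes of the same string are comparable, so at most one list element can match
theorem pv_filter_len_le_one (s : String) {L : List String}
    (h : L.Pairwise (fun p q => ¬(p.toList <+: q.toList) ∧ ¬(q.toList <+: p.toList))) :
    (L.filter (fun p => PySem.Str.startswith s p)).length ≤ 1 := by
  induction L with
  | nil => simp
  | cons a t ih =>
    rcases List.pairwise_cons.mp h with ⟨ha, ht⟩
    by_cases hf : PySem.Str.startswith s a
    · have hnil : t.filter (fun p => PySem.Str.startswith s p) = [] := by
        rw [List.filter_eq_nil_iff]
        intro q hq hqf
        have hpa : a.toList <+: s.toList := by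
          have := hf; rw [PySem.Str.startswith_eq] at this
          exact (PySem.Chars.startswith_iff _ _).mp this
        have hpq : q.toList <+: s.toList := by
          rw [PySem.Str.startswith_eq] at hqf
          exact (PySem.Chars.startswith_iff _ _).mp hqf
        rcases List.prefix_or_prefix_of_prefix hpa hpq with h1 | h2
        · exact (ha q hq).1 h1
        · exact (ha q hq).2 h2
      have hf' := hf; rw [PySem.Str.startswith_eq] at hf'
      simp [List.filter, hf']
      intro q hq
      have hqf := (List.filter_eq_nil_iff.mp hnil) q hq
      rw [PySem.Str.startswith_eq] at hqf
      simpa using hqf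
    · have hf' : ¬ PySem.Chars.startswith s.toList a.toList = true := by
        rw [PySem.Str.startswith_eq] at hf; exact hf
      simpa [List.filter, hf'] using ih ht

-- ===== VERDICT (by name: the statement is the Claim_ definition above) =====
theorem extract_explicit_topic_py_spec : Claim_equal_extract_explicit_topic_py := by
  intro message _
  unfold Spec_extract_explicit_topic_py extract_explicit_topic_py extract_explicit_topic_py_alt
  simp only []
  set text := PySem.Str.strip message with htext
  set lowered := PySem.Str.lower text with hlow
  rw [pvLoopA_eq_filter]
  have hle := pv_filter_len_le_one lowered pvPrefixes_pairwise
  rcases hfil : pvPrefixes.filter (fun p => PySem.Str.startswith lowered p) with _ | ⟨p, rest⟩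
  · simp [PySem.List.max?]
  · rw [hfil] at hle
    have hrest : rest = [] := by
      cases rest with
      | nil => rfl
      | cons b rb => simp at hle
    subst hrest
    simp [PySem.List.max?]
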